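-- pv_equiv track=rewrite | github.com/TheCloudCassroom/TheCloudClassroom | fetch_css7.py | find_enclosing_media
-- ===== SOURCE A (Python) =====
-- def find_enclosing_media(css_text, pos):
--     """Walk backwards from pos counting braces to find enclosing @media."""
--     # Count curly braces backwards from pos
--     depth = 0
--     i = pos - 1
--     while i >= 0:
--         if css_text[i] == '}':
--             depth += 1
--         elif css_text[i] == '{':
--             if depth > 0:
--                 depth -= 1
--             else:
--                 # This { opens a block we're inside. Check if it's @media
--                 # Look backwards for @media
--                 pre = css_text[max(0, i-100):i].strip()
--                 if pre.endswith(')') or '@media' in pre: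
--                     # Find the @media start
--                     media_start = pre.rfind('@media')
--                     if media_start >= 0:
--                         return pre[media_start:] + css_text[i]
--                     return "(nested in unknown block)"
--                 else:
--                     # This is a rule selector, not a media query
--                     # We're at the top level
--                     return "GLOBAL (no media query)"
--         i -= 1
--     return "GLOBAL (beginning of file)"
-- ===== SOURCE B (Python) =====
-- def find_enclosing_media(css_text, pos):
--     """Forward parse: keep a stack of open-brace indices over css_text[:pos];
--     the stack top is the innermost enclosing '{'."""
--     stack = []
--     for i, c in enumerate(css_text[:max(0, pos)]):
--         if c == '{':
--             stack.append(i)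
--         elif c == '}' and stack:
--             stack.pop()
--     if not stack:
--         return "GLOBAL (beginning of file)"
--     i = stack[-1]
--     pre = css_text[max(0, i-100):i].strip()
--     if pre.endswith(')') or '@media' in pre:
--         media_start = pre.rfind('@media')
--         if media_start >= 0:
--             return pre[media_start:] + css_text[i]
--         return "(nested in unknown block)"
--     return "GLOBAL (no media query)"
-- ===== Notes on version B (the rewrite author's own statement) =====
-- stated objective: alternative
-- what changed: Replaces A's backward walk from pos with a depth counter by a single forward parse of css_text[:pos] maintaining a stack of open-brace indices; the stack top is the innermost enclosing '{', and the @media post-processing is unchanged.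
import Mathlib
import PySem

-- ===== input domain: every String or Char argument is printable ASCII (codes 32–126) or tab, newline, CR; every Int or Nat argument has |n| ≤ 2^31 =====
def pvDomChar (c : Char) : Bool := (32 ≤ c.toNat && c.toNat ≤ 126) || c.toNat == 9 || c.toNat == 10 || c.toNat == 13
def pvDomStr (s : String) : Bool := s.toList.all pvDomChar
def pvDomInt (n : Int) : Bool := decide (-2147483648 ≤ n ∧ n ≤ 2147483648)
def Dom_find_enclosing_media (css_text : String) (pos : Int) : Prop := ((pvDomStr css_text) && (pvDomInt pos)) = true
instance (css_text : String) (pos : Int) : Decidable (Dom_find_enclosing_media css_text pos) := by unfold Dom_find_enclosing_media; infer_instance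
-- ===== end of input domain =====

-- B replaces A's backward depth-counting scan by a forward parse that keeps a stack of
-- open-brace indices (objective: alternative; same identical @media post-processing).

-- ===== PORT A =====
-- A's inline @media post-processing (the body of the 'depth == 0' branch that returns)
def pvAfound (cs : List Char) (i : Int) : String :=
  let pre := PySem.Chars.strip (PySem.List.slice cs (some (max 0 (i - 100))) (some i))
  if PySem.Chars.endswith pre [')'] || PySem.Chars.isIn "@media".toList pre then
    let media_start := PySem.Chars.rfind pre "@media".toList
    if media_start ≥ 0 then
      String.ofList (PySem.List.slice pre (some media_start) none ++ [PySem.List.pyGetD cs i ' '])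
    else "(nested in unknown block)"
  else "GLOBAL (no media query)"

-- A's while loop: i walks backward from pos-1, depth counts '}'s
def pvAloop (cs : List Char) (depth : Int) (i : Int) : String :=
  if h : 0 ≤ i then
    let c := PySem.List.pyGetD cs i ' '   -- css_text[i]; Pre_ guarantees i < len cs
    if c = '}' then pvAloop cs (depth + 1) (i - 1)
    else if c = '{' then
      if depth > 0 then pvAloop cs (depth - 1) (i - 1)
      else pvAfound cs i
    else pvAloop cs depth (i - 1)
  else "GLOBAL (beginning of file)"
termination_by (i + 1).toNat
decreasing_by all_goals omega

def find_enclosing_media (css_text : String) (pos : Int) : String :=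
  pvAloop css_text.toList 0 (pos - 1)

-- ===== PORT B =====
-- identical post-processing code, as in Source B
def pvBfound (cs : List Char) (i : Int) : String :=
  let pre := PySem.Chars.strip (PySem.List.slice cs (some (max 0 (i - 100))) (some i))
  if PySem.Chars.endswith pre [')'] || PySem.Chars.isIn "@media".toList pre then
    let media_start := PySem.Chars.rfind pre "@media".toList
    if media_start ≥ 0 then
      String.ofList (PySem.List.slice pre (some media_start) none ++ [PySem.List.pyGetD cs i ' '])
    else "(nested in unknown block)"
  else "GLOBAL (no media query)"

-- one step of the forward parse: push an open brace, pop (if possible) on a close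
def pvBstep (st : List Int) (p : Int × Char) : List Int :=
  if p.2 = '{' then st ++ [p.1]
  else if p.2 = '}' ∧ st ≠ [] then st.dropLast
  else st

def find_enclosing_media_alt (css_text : String) (pos : Int) : String :=
  match ((PySem.List.enumerate (PySem.List.slice css_text.toList none (some (max 0 pos))) 0).foldl pvBstep []).getLast? with
  | none => "GLOBAL (beginning of file)"   -- 'if not stack: …'
  | some i => pvBfound css_text.toList i   -- 'i = stack[-1]'


-- ===== PRECONDITION & SPEC =====
-- A indexes css_text[pos-1] unguarded: it raises IndexError iff pos > len(css_text).
def Pre_find_enclosing_media (css_text : String) (pos : Int) : Prop :=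
  pos ≤ (css_text.toList.length : Int)
instance (css_text : String) (pos : Int) : Decidable (Pre_find_enclosing_media css_text pos) := by
  unfold Pre_find_enclosing_media; infer_instance

def pvWitness_find_enclosing_media : String × Int := ("@media (x){a", 12)

def Spec_find_enclosing_media (css_text : String) (pos : Int) (out : String) : Prop :=
  out = find_enclosing_media_alt css_text pos
instance (css_text : String) (pos : Int) (out : String) : Decidable (Spec_find_enclosing_media css_text pos out) := by
  unfold Spec_find_enclosing_media; infer_instance

-- ===== CLAIM (what is proved, stated in full; the proofs are below) =====
def Claim_equal_find_enclosing_media : Prop := ∀ (css_text : String) (pos : Int), Dom_find_enclosing_media css_text pos → Pre_find_enclosing_media css_text pos → Spec_find_enclosing_media css_text pos (find_enclosing_media css_text pos)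

-- ===== LEMMAS AND PROOFS =====

-- the stack after forward-parsing the first m characters of cs
def pvStk (cs : List Char) (m : Nat) : List Int :=
  (PySem.List.enumerate (cs.take m) 0).foldl pvBstep []

lemma pvStk_succ (cs : List Char) (m : Nat) (h : m < cs.length) :
    pvStk cs (m + 1) = pvBstep (pvStk cs m) ((m : Int), cs[m]) := by
  unfold pvStk
  rw [show cs.take (m+1) = cs.take m ++ [cs[m]] from by
        rw [List.take_add_one, List.getElem?_eq_getElem h]; rfl,
      PySem.List.enumerate_append, List.foldl_append]
  simp [PySem.List.enumerate_cons, PySem.List.enumerate_nil, Nat.le_of_lt h]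

-- popping the top of the stack shifts the view from the top by one
lemma rev_dropLast (S : List Int) (h : S ≠ []) (d : Nat) :
    S.dropLast.reverse[d]? = S.reverse[d+1]? := by
  conv_rhs => rw [show S.reverse = S.getLast h :: S.dropLast.reverse from by
    conv_lhs => rw [← List.dropLast_concat_getLast h]
    simp]
  simp

-- core invariant: A's backward scan with depth d answers what sits d below the top of B's stack
lemma pvLoop_eq_stk (cs : List Char) : ∀ (m : Nat), m ≤ cs.length → ∀ (d : Nat),
    pvAloop cs (d : Int) ((m : Int) - 1) =
      match (pvStk cs m).reverse[d]? with
      | some j => pvAfound cs j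
      | none => "GLOBAL (beginning of file)" := by
  intro m
  induction m with
  | zero =>
    intro _ d
    rw [pvAloop]
    norm_num
    simp [pvStk, PySem.List.enumerate_nil]
  | succ m ih =>
    intro hm d
    have hml : m < cs.length := by omega
    have hcast : ((m + 1 : Nat) : Int) - 1 = (m : Int) := by push_cast; ring
    rw [hcast, pvAloop, dif_pos (by positivity : (0:Int) ≤ (m:Int))]
    have hget : PySem.List.pyGetD cs (m : Int) ' ' = cs[m] := by
      simp [PySem.List.pyGetD_natCast, List.getD_eq_getElem?_getD, List.getElem?_eq_getElem hml]
    rw [pvStk_succ _ _ hml]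
    simp only [hget, pvBstep]
    by_cases hbr : cs[m] = '}'
    · rw [if_pos hbr, if_neg (by rw [hbr]; decide)]
      have := ih (by omega) (d + 1)
      push_cast at this
      rw [this]
      by_cases hS : pvStk cs m = []
      · rw [if_neg (by simp [hS, hbr])]
        simp [hS]
      · rw [if_pos ⟨hbr, hS⟩, rev_dropLast _ hS]
    · rw [if_neg hbr]
      by_cases hob : cs[m] = '{'
      · rw [if_pos hob, if_pos hob]
        cases d with
        | zero =>
          rw [if_neg (by norm_num)]
          simp
        | succ d' =>
          rw [if_pos (by positivity)]
          have := ih (by omega) d'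
          have hc2 : ((d' + 1 : Nat) : Int) - 1 = (d' : Int) := by push_cast; ring
          rw [hc2, this]
          simp
      · rw [if_neg hob, if_neg hob, ih (by omega) d, if_neg (fun hc => hbr hc.1)]

-- ===== VERDICT (by name: the statement is the Claim_ definition above) =====
theorem find_enclosing_media_spec : Claim_equal_find_enclosing_media := by
  intro css pos _ hpre
  unfold Pre_find_enclosing_media at hpre
  unfold Spec_find_enclosing_media find_enclosing_media find_enclosing_media_alt
  have hlast : ∀ (S : List Int), S.getLast? = S.reverse[0]? := by
    intro S
    rw [← List.head?_reverse, List.head?_eq_getElem?]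
  by_cases hp : pos ≤ 0
  · rw [pvAloop, dif_neg (by omega), show max 0 pos = 0 from by omega]
    rw [show PySem.List.slice css.toList none (some 0) = css.toList.take (0:Int).toNat from
          PySem.List.slice_to css.toList le_rfl]
    simp [PySem.List.enumerate_nil]
  · have h0 : (0 : Int) ≤ pos := by omega
    have hm : pos.toNat ≤ css.toList.length := by omega
    have hA : pos - 1 = ((pos.toNat : Nat) : Int) - 1 := by omega
    rw [hA, show (0 : Int) = ((0 : Nat) : Int) from rfl, pvLoop_eq_stk css.toList pos.toNat hm 0]
    simp only [Nat.cast_zero]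
    rw [show max (0:Int) pos = pos from by omega, PySem.List.slice_to css.toList h0]
    rw [show (List.foldl pvBstep [] (PySem.List.enumerate (css.toList.take pos.toNat) (0:Int))) = pvStk css.toList pos.toNat from rfl,
        hlast]
    cases (pvStk css.toList pos.toNat).reverse[0]? <;> rfl
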